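-- pv_equiv track=rewrite | github.com/hamletsunil/govdirectory | scripts/scrape-cdc-places.py | insert_key_after
-- ===== SOURCE A (Python) =====
-- from collections import OrderedDict
--
-- def insert_key_after(d: dict, after_key: str, new_key: str, new_value) -> OrderedDict:
--     """Insert a new key into a dict after a specified key, preserving order."""
--     result = OrderedDict()
--     inserted = False
--     for k, v in d.items():
--         result[k] = v
--         if k == after_key:
--             result[new_key] = new_value
--             inserted = True
--     if not inserted:
--         result[new_key] = new_value
--     return result
-- ===== SOURCE B (Python) =====
-- from collections import OrderedDict
--
-- def insert_key_after(d: dict, after_key: str, new_key: str, new_value) -> OrderedDict: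
--     """Insert a new key into a dict after a specified key, preserving order."""
--     items = list(d.items())
--     keys = [k for k, _ in items]
--     pos = keys.index(after_key) + 1 if after_key in keys else len(items)
--     items.insert(pos, (new_key, new_value))
--     return OrderedDict(items)
-- ===== Notes on version B (the rewrite author's own statement) =====
-- stated objective: simpler
-- what changed: Replaces A's streaming rebuild with an inline insert-branch and a not-found flag by an index-then-splice decomposition: find the position of after_key, splice the new pair into the materialized item list, and rebuild an OrderedDict.
import Mathlib
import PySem

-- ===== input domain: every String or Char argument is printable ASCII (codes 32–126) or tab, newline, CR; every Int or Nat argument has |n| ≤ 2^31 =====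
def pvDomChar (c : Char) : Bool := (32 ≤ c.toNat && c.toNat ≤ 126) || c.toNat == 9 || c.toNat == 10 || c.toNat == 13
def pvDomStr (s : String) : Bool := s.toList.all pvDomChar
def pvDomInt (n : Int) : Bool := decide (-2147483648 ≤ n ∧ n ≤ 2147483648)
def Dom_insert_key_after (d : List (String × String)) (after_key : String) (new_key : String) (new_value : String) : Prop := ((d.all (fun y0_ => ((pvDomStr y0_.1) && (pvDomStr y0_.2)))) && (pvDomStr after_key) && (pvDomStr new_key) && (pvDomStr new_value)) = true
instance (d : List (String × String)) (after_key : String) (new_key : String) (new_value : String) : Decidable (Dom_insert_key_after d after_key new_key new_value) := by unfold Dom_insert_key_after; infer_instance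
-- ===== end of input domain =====

-- B replaces A's streaming rebuild with an inline branch and a not-found flag by an
-- index-then-splice decomposition (find the position, splice the pair, rebuild); same cost, simpler.
-- The assoc list stands for a Python dict; both ports decode it with Dict.ofList first
-- (for a genuine dict input, i.e. distinct keys, this is the identity).

-- ===== PORT A =====
def insert_key_after (d : List (String × String)) (after_key : String) (new_key : String) (new_value : String) : List (String × String) :=
  -- result = OrderedDict(); inserted = False; for k, v in d.items(): …
  let st := ((PySem.Dict.ofList d).items).foldl
    (fun (st : PySem.Dict String String × Bool) kv =>
      let r := st.1.insert kv.1 kv.2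
      if kv.1 = after_key then (r.insert new_key new_value, true) else (r, st.2))
    (PySem.Dict.empty, false)
  -- if not inserted: result[new_key] = new_value
  (if st.2 = false then st.1.insert new_key new_value else st.1).items

-- ===== PORT B =====
def insert_key_after_alt (d : List (String × String)) (after_key : String) (new_key : String) (new_value : String) : List (String × String) :=
  let items := (PySem.Dict.ofList d).items          -- items = list(d.items())
  let keys := items.map Prod.fst                    -- keys = [k for k, _ in items]
  let pos : Int :=                                  -- pos = keys.index(after_key) + 1 if after_key in keys else len(items)
    match PySem.List.index? keys after_key with
    | some i => (i : Int) + 1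
    | none   => (items.length : Int)
  let items2 := PySem.List.insert items pos (new_key, new_value)   -- items.insert(pos, (new_key, new_value))
  (PySem.Dict.ofList items2).items                  -- return OrderedDict(items)

-- ===== PRECONDITION & SPEC =====
def Spec_insert_key_after (d : List (String × String)) (after_key : String) (new_key : String) (new_value : String) (out : List (String × String)) : Prop := out = insert_key_after_alt d after_key new_key new_value
instance (d : List (String × String)) (after_key : String) (new_key : String) (new_value : String) (out : List (String × String)) : Decidable (Spec_insert_key_after d after_key new_key new_value out) := by unfold Spec_insert_key_after; infer_instance

-- ===== CLAIM (what is proved, stated in full; the proofs are below) =====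
def Claim_equal_insert_key_after : Prop := ∀ (d : List (String × String)) (after_key : String) (new_key : String) (new_value : String), Dom_insert_key_after d after_key new_key new_value → Spec_insert_key_after d after_key new_key new_value (insert_key_after d after_key new_key new_value)

-- ===== LEMMAS AND PROOFS =====

-- Over a block of items none of whose keys equals `a`, A's loop body never fires its
-- branch: it is a plain insert-fold and the flag is unchanged.
theorem step_no_fire (a nk nv : String) (L : List (String × String))
    (hb : a ∉ L.map Prod.fst) (r : PySem.Dict String String) (b : Bool) :
    L.foldl (fun (st : PySem.Dict String String × Bool) kv =>
        let r' := st.1.insert kv.1 kv.2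
        if kv.1 = a then (r'.insert nk nv, true) else (r', st.2)) (r, b)
      = (L.foldl (fun r kv => r.insert kv.1 kv.2) r, b) := by
  induction L generalizing r with
  | nil => rfl
  | cons kv L ih =>
    simp only [List.map_cons, List.mem_cons] at hb
    push Not at hb
    simp only [List.foldl_cons]
    rw [if_neg (fun h => hb.1 h.symm)]
    exact ih hb.2 _

-- Splicing into a cons at a shifted position.
theorem insert_cons_succ (xs : List (String × String)) (y : String × String) (p : Nat)
    (hp : p ≤ xs.length) (v : String × String) :
    PySem.List.insert (y :: xs) ((p : Int) + 1) v = y :: PySem.List.insert xs (p : Int) v := by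
  rw [show ((p : Int) + 1) = (((p + 1 : Nat) : Int)) by push_cast; ring]
  rw [PySem.List.insert_natCast _ _ _ (by simpa using Nat.succ_le_succ hp),
      PySem.List.insert_natCast _ _ _ hp]
  simp

-- Main invariant: on a key-Nodup item list, A's flagged streaming build equals
-- B's index-then-splice build, for any starting dict.
theorem core_eq (a nk nv : String) (L : List (String × String))
    (h : (L.map Prod.fst).Nodup) (r : PySem.Dict String String) :
    (let st := L.foldl (fun (st : PySem.Dict String String × Bool) kv =>
        let r' := st.1.insert kv.1 kv.2
        if kv.1 = a then (r'.insert nk nv, true) else (r', st.2)) (r, false)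
     if st.2 = false then st.1.insert nk nv else st.1)
    = (PySem.List.insert L
        (match PySem.List.index? (L.map Prod.fst) a with
         | some i => (i : Int) + 1
         | none   => (L.length : Int)) (nk, nv)).foldl
        (fun r kv => r.insert kv.1 kv.2) r := by
  induction L generalizing r with
  | nil =>
    simp [PySem.List.index?, PySem.List.insert]
  | cons kv L ih =>
    simp only [List.map_cons] at h ⊢
    rw [List.nodup_cons] at h
    by_cases hk : kv.1 = a
    · -- head fires: A inserts right here; B splices at position 1
      have hnotin : a ∉ L.map Prod.fst := hk ▸ h.1
      rw [hk, PySem.List.index?_cons_self]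
      simp only [List.foldl_cons]
      rw [if_pos hk, step_no_fire a nk nv L hnotin]
      rw [show ((0 : Nat) : Int) + 1 = (((1 : Nat) : Int)) by norm_num]
      rw [PySem.List.insert_natCast _ _ _ (by simp)]
      simp [hk]
    · -- head does not fire: shift both sides by one and recurse
      rw [PySem.List.index?_cons_of_ne (List.map Prod.fst L) hk]
      simp only [List.foldl_cons]
      rw [if_neg hk]
      rw [ih h.2 (r.insert kv.1 kv.2)]
      cases hidx : PySem.List.index? (L.map Prod.fst) a with
      | none =>
        simp only [Option.map_none]
        rw [show (((kv :: L).length : Nat) : Int) = ((L.length : Nat) : Int) + 1 by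
          simp [List.length_cons]]
        rw [insert_cons_succ _ _ _ (le_refl _)]
        simp
      | some i =>
        simp only [Option.map_some]
        have hi' : i + 1 ≤ L.length := by
          have := (PySem.List.getElem_of_index?_eq_some hidx).choose
          simpa using this
        rw [insert_cons_succ _ _ _ hi']
        simp

-- ===== VERDICT (by name: the statement is the Claim_ definition above) =====
theorem insert_key_after_spec : Claim_equal_insert_key_after := by
  intro d a nk nv _
  show insert_key_after d a nk nv = insert_key_after_alt d a nk nv
  unfold insert_key_after insert_key_after_alt
  have hnd : (((PySem.Dict.ofList d).items).map Prod.fst).Nodup :=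
    PySem.Dict.nodup_keys_ofList d
  exact congrArg PySem.Dict.items (core_eq a nk nv _ hnd PySem.Dict.empty)
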